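-- pv_equiv track=rewrite | github.com/JohnFu11er/Python_Practice | Find_my_weather.py | line_breaks
-- ===== SOURCE A (Python) =====
-- def line_breaks(chars:str):
--     ''' Returns string with a line break entered at defined interval '''
--
--     chars = chars.split(" ")
--     output = ""
--     while chars:
--         for word in chars[:8]:
--             output += str(word) + " "
--         output += "\n"
--         chars = chars[8:]
--     return output
-- ===== SOURCE B (Python) =====
-- def line_breaks(chars: str):
--     ''' Returns string with a line break entered at defined interval '''
--     words = chars.split(" ")
--     output = ""
--     for i, word in enumerate(words):
--         output += word + " "
--         if (i + 1) % 8 == 0: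
--             output += "\n"
--     if len(words) % 8 != 0:
--         output += "\n"
--     return output
-- ===== Notes on version B (the rewrite author's own statement) =====
-- stated objective: simpler
-- what changed: Replaced A's nested while/slice chunking (repeated chars[:8]/chars[8:] list copies) with a single flat enumerate pass that inserts a newline after every 8th word and one trailing newline for a final partial chunk.
import Mathlib
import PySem

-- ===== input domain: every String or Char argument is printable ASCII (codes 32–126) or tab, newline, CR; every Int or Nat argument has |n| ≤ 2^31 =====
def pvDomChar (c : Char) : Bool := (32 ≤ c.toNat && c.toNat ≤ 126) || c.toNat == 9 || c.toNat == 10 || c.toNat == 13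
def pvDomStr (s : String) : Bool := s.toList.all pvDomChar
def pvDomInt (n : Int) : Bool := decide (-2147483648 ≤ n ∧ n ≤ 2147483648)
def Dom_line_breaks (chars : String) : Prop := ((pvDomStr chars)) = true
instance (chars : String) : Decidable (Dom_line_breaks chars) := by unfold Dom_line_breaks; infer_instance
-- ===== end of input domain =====

-- B replaces A's nested while/slice chunk loop by one flat enumerate pass (simpler decomposition; return value proved equal).

-- ===== PORT A =====
-- A's while loop: chunks of 8 via chars[:8] / chars[8:]
def lbLoop : List String → String → String
  | [], out => out
  | w :: ws, out =>
      lbLoop (PySem.List.slice (w :: ws) (some 8) none)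
        ((PySem.List.slice (w :: ws) none (some 8)).foldl
          (fun o word => o ++ word ++ " ") out ++ "\n")
termination_by l => l.length
decreasing_by
  rw [PySem.List.slice_from _ (by norm_num)]
  simp

def line_breaks (chars : String) : String :=
  lbLoop ((PySem.Str.split? chars " ").getD []) ""

-- ===== PORT B =====
def line_breaks_alt (chars : String) : String :=
  let words := (PySem.Str.split? chars " ").getD []
  let out := (PySem.List.enumerate words).foldl
    (fun o p =>
      let o' := o ++ p.2 ++ " "
      if PySem.Int.mod (p.1 + 1) 8 == 0 then o' ++ "\n" else o') ""
  if words.length % 8 ≠ 0 then out ++ "\n" else out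

-- ===== PRECONDITION & SPEC =====
def Spec_line_breaks (chars : String) (out : String) : Prop := out = line_breaks_alt chars
instance (chars : String) (out : String) : Decidable (Spec_line_breaks chars out) := by unfold Spec_line_breaks; infer_instance

-- ===== CLAIM (what is proved, stated in full; the proofs are below) =====
def Claim_equal_line_breaks : Prop := ∀ (chars : String), Dom_line_breaks chars → Spec_line_breaks chars (line_breaks chars)

-- ===== LEMMAS AND PROOFS =====

-- A's inner for-loop body and B's fold body, as proof abbreviations
def pvW (l : List String) (acc : String) : String :=
  l.foldl (fun o word => o ++ word ++ " ") acc

def pvBf (e : List (Int × String)) (acc : String) : String :=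
  e.foldl (fun o p =>
    let o' := o ++ p.2 ++ " "
    if PySem.Int.mod (p.1 + 1) 8 == 0 then o' ++ "\n" else o') acc

theorem pvMod8 (a : Int) : PySem.Int.mod a 8 = a % 8 := by
  rw [PySem.Int.mod, Int.fmod_eq_emod]; omega

theorem pvW_acc (l : List String) (a b : String) : pvW l (a ++ b) = a ++ pvW l b := by
  induction l generalizing b with
  | nil => rfl
  | cons x xs ih =>
      simp only [pvW, List.foldl_cons] at *
      rw [show a ++ b ++ x ++ " " = a ++ (b ++ x ++ " ") by
        rw [String.append_assoc, String.append_assoc, String.append_assoc]]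
      exact ih _

theorem pvBf_acc (e : List (Int × String)) (a b : String) : pvBf e (a ++ b) = a ++ pvBf e b := by
  induction e generalizing b with
  | nil => rfl
  | cons x xs ih =>
      simp only [pvBf, List.foldl_cons] at *
      split
      · rw [show a ++ b ++ x.2 ++ " " ++ "\n" = a ++ (b ++ x.2 ++ " " ++ "\n") by
          simp only [String.append_assoc]]
        exact ih _
      · rw [show a ++ b ++ x.2 ++ " " = a ++ (b ++ x.2 ++ " ") by
          simp only [String.append_assoc]]
        exact ih _

theorem pvBf_shift (l : List String) (s t : Int) (acc : String) (h : s % 8 = t % 8) :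
    pvBf (PySem.List.enumerate l s) acc = pvBf (PySem.List.enumerate l t) acc := by
  induction l generalizing s t acc with
  | nil => rfl
  | cons x xs ih =>
      rw [PySem.List.enumerate_cons, PySem.List.enumerate_cons]
      simp only [pvBf, List.foldl_cons, pvMod8] at *
      have h1 : (s + 1) % 8 = (t + 1) % 8 := by omega
      rw [h1]
      split <;> exact ih (s + 1) (t + 1) _ (by omega)

theorem pvChunk (c : List String) (s : Int) (acc : String) (hs : 0 ≤ s)
    (hle : s.toNat + c.length ≤ 8) :
    pvBf (PySem.List.enumerate c s) acc =
      if s.toNat + c.length = 8 ∧ c ≠ [] then pvW c acc ++ "\n" else pvW c acc := by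
  induction c generalizing s acc with
  | nil => simp [pvBf, pvW, PySem.List.enumerate]
  | cons x xs ih =>
      rw [PySem.List.enumerate_cons]
      simp only [pvBf, List.foldl_cons, pvMod8, beq_iff_eq]
      have hb : s + 1 + xs.length ≤ 8 := by
        simp only [List.length_cons] at hle; omega
      by_cases h8 : s + 1 = 8
      · have hxs : xs = [] := by
          cases xs with
          | nil => rfl
          | cons y ys => exfalso; simp only [List.length_cons] at hb; omega
        subst hxs
        rw [if_pos (by omega : (s + 1) % 8 = 0)]
        have hcond : s.toNat + ([x] : List String).length = 8 ∧ ([x] : List String) ≠ [] := by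
          refine ⟨?_, by simp⟩
          simp only [List.length_cons, List.length_nil]
          omega
        rw [if_pos hcond]
        show pvBf (PySem.List.enumerate [] (s + 1)) (acc ++ x ++ " " ++ "\n") = _
        simp [pvBf, pvW, PySem.List.enumerate]
      · rw [if_neg (by omega : ¬ (s + 1) % 8 = 0)]
        have hrec := ih (s + 1) (acc ++ x ++ " ") (by omega)
          (by simp only [List.length_cons] at hle ⊢; omega)
        simp only [pvBf, pvMod8, beq_iff_eq] at hrec
        rw [hrec]
        have hWc : pvW (x :: xs) acc = pvW xs (acc ++ x ++ " ") := by
          simp only [pvW, List.foldl_cons]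
        rw [hWc]
        by_cases hxs : xs = []
        · subst hxs
          have hneg : ¬ (s.toNat + ([x] : List String).length = 8 ∧ ([x] : List String) ≠ []) := by
            rintro ⟨h, -⟩
            simp only [List.length_cons, List.length_nil] at h
            omega
          rw [if_neg (by simp), if_neg hneg]
        · have hiff : ((s + 1).toNat + xs.length = 8 ∧ xs ≠ []) ↔
              (s.toNat + (x :: xs).length = 8 ∧ x :: xs ≠ []) := by
            simp only [List.length_cons]
            constructor
            · rintro ⟨h, -⟩; exact ⟨by omega, by simp⟩
            · rintro ⟨h, -⟩; exact ⟨by omega, hxs⟩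
          rw [if_congr hiff rfl rfl]

theorem pvLbLoop_acc (n : Nat) : ∀ (l : List String), l.length ≤ n → ∀ (a b : String),
    lbLoop l (a ++ b) = a ++ lbLoop l b := by
  induction n with
  | zero =>
      intro l hl a b
      have : l = [] := List.length_eq_zero_iff.mp (Nat.le_zero.mp hl)
      subst this; simp [lbLoop]
  | succ n ih =>
      intro l hl a b
      cases l with
      | nil => simp [lbLoop]
      | cons w ws =>
          rw [lbLoop, lbLoop]
          rw [PySem.List.slice_to _ (by norm_num), PySem.List.slice_from _ (by norm_num)]
          have hlen : (List.drop (8:Int).toNat (w :: ws)).length ≤ n := by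
            simp at hl ⊢; omega
          rw [show ((List.take (8:Int).toNat (w :: ws)).foldl
                (fun o word => o ++ word ++ " ") (a ++ b)) =
              pvW (List.take (8:Int).toNat (w :: ws)) (a ++ b) from rfl,
              show ((List.take (8:Int).toNat (w :: ws)).foldl
                (fun o word => o ++ word ++ " ") b) =
              pvW (List.take (8:Int).toNat (w :: ws)) b from rfl]
          rw [pvW_acc, String.append_assoc]
          exact ih _ hlen a _

theorem pvMain (n : Nat) : ∀ (ws : List String), ws.length ≤ n →
    lbLoop ws "" =
      (if ws.length % 8 ≠ 0 then pvBf (PySem.List.enumerate ws 0) "" ++ "\n"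
       else pvBf (PySem.List.enumerate ws 0) "") := by
  induction n with
  | zero =>
      intro ws hl
      have : ws = [] := List.length_eq_zero_iff.mp (Nat.le_zero.mp hl)
      subst this; simp [lbLoop, pvBf, PySem.List.enumerate]
  | succ n ih =>
      intro ws hl
      cases hws : ws with
      | nil => simp [lbLoop, pvBf, PySem.List.enumerate]
      | cons w t =>
          rw [lbLoop]
          rw [PySem.List.slice_to _ (by norm_num), PySem.List.slice_from _ (by norm_num)]
          have h8 : (8:Int).toNat = 8 := rfl
          rw [h8]
          rw [show ((List.take 8 (w :: t)).foldl
                (fun o word => o ++ word ++ " ") "") = pvW (List.take 8 (w :: t)) "" from rfl]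
          by_cases hle : ws.length ≤ 8
          · -- single (final) chunk
            have htake : List.take 8 (w :: t) = w :: t := by
              apply List.take_of_length_le; rw [← hws]; exact hle
            have hdrop : List.drop 8 (w :: t) = [] := by
              apply List.drop_eq_nil_of_le; rw [← hws]; exact hle
            rw [htake, hdrop, lbLoop]
            have hch := pvChunk (w :: t) 0 "" (le_refl 0) (by rw [← hws]; simpa using hle)
            simp only [Int.toNat_zero, Nat.zero_add] at hch
            rw [hch]
            by_cases hlen8 : (w :: t).length = 8
            · rw [if_neg (show ¬ (w :: t).length % 8 ≠ 0 by simp [hlen8]),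
                 if_pos ⟨hlen8, by simp⟩]
            · have hpos : (w :: t).length % 8 ≠ 0 := by
                have h1 : 1 ≤ (w :: t).length := by simp
                have h2 : (w :: t).length ≤ 8 := by rw [← hws]; exact hle
                omega
              rw [if_pos hpos, if_neg (fun hc => hlen8 hc.1)]
          · -- full chunk then recurse
            rw [not_le] at hle
            have hlt : 8 < (w :: t).length := by rw [← hws]; exact hle
            have hlt' : 8 < t.length + 1 := by simpa using hlt
            have htl : (List.take 8 (w :: t)).length = 8 := by
              rw [List.length_take]; simp only [List.length_cons]; omega
            have hdl : (List.drop 8 (w :: t)).length = (w :: t).length - 8 := by simp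
            -- B side: split the enumeration at 8
            have hsplit : PySem.List.enumerate (w :: t) 0 =
                PySem.List.enumerate (List.take 8 (w :: t)) 0 ++
                PySem.List.enumerate (List.drop 8 (w :: t)) (0 + (List.take 8 (w :: t)).length) := by
              rw [← PySem.List.enumerate_append, List.take_append_drop]
            have hbf : pvBf (PySem.List.enumerate (w :: t) 0) "" =
                pvBf (PySem.List.enumerate (List.drop 8 (w :: t)) 8)
                  (pvBf (PySem.List.enumerate (List.take 8 (w :: t)) 0) "") := by
              rw [hsplit, htl]
              simp only [pvBf, List.foldl_append]
              norm_num
            have hshift := pvBf_shift (List.drop 8 (w :: t)) 8 0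
              (pvBf (PySem.List.enumerate (List.take 8 (w :: t)) 0) "") (by norm_num)
            have hch := pvChunk (List.take 8 (w :: t)) 0 "" (le_refl 0) (by simp)
            simp only [Int.toNat_zero, Nat.zero_add] at hch
            rw [if_pos ⟨htl, by simp⟩] at hch
            have hacc : pvBf (PySem.List.enumerate (List.drop 8 (w :: t)) 0)
                  (pvW (List.take 8 (w :: t)) "" ++ "\n") =
                (pvW (List.take 8 (w :: t)) "" ++ "\n") ++
                  pvBf (PySem.List.enumerate (List.drop 8 (w :: t)) 0) "" := by
              have := pvBf_acc (PySem.List.enumerate (List.drop 8 (w :: t)) 0)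
                (pvW (List.take 8 (w :: t)) "" ++ "\n") ""
              rwa [String.append_empty] at this
            -- A side: pull the accumulator out and apply the IH on the tail
            have hA : lbLoop (List.drop 8 (w :: t)) (pvW (List.take 8 (w :: t)) "" ++ "\n") =
                (pvW (List.take 8 (w :: t)) "" ++ "\n") ++ lbLoop (List.drop 8 (w :: t)) "" := by
              have := pvLbLoop_acc (List.drop 8 (w :: t)).length (List.drop 8 (w :: t))
                (le_refl _) (pvW (List.take 8 (w :: t)) "" ++ "\n") ""
              rwa [String.append_empty] at this
            have hIH := ih (List.drop 8 (w :: t)) (by rw [hdl]; rw [hws] at hl; omega)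
            have hmod : (List.drop 8 (w :: t)).length % 8 = (w :: t).length % 8 := by
              rw [hdl]; omega
            rw [hmod] at hIH
            rw [hA, hIH, hbf, hshift, hch, hacc]
            by_cases hm : (w :: t).length % 8 ≠ 0
            · rw [if_pos hm, if_pos hm]
              simp [String.append_assoc]
            · rw [if_neg hm, if_neg hm]

-- ===== VERDICT (by name: the statement is the Claim_ definition above) =====
theorem line_breaks_spec : Claim_equal_line_breaks := by
  unfold Claim_equal_line_breaks
  intro chars _
  unfold Spec_line_breaks line_breaks line_breaks_alt
  set words := (PySem.Str.split? chars " ").getD [] with hwords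
  have := pvMain words.length words (le_refl _)
  simp only [pvBf] at this
  rw [this]
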